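-- pv_equiv track=rewrite | github.com/leehnmn/codyssey | main 4-2/inventory_analyzer.py | _find_fi_key
-- ===== SOURCE A (Python) =====
-- from typing import List, Dict, Any, Optional, Tuple
--
-- FI_CANDIDATE_KEYS = ('flammability', 'flammability_index', 'flammability idx', 'fi')
--
-- def _find_fi_key(header: List[str]) -> Optional[str]:
--
--     lower = [h.strip().lower() for h in header]
--
--     for key in FI_CANDIDATE_KEYS:
--
--         if key in lower:
--
--             return header[lower.index(key)]
--
--     for i, h in enumerate(lower):
--
--         if 'flammability' in h:
--
--             return header[i]
--
--     return None
-- ===== SOURCE B (Python) =====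
-- # One pass over the header with a priority rank per entry; earliest lowest rank wins.
-- FI_CANDIDATE_KEYS = ('flammability', 'flammability_index', 'flammability idx', 'fi')
--
-- def _find_fi_key(header):
--     best_rank = None
--     best_val = None
--     for h in header:
--         s = h.strip().lower()
--         if s == 'flammability':
--             r = 0
--         elif s == 'flammability_index':
--             r = 1
--         elif s == 'flammability idx':
--             r = 2
--         elif s == 'fi':
--             r = 3
--         elif 'flammability' in s:
--             r = 4
--         else:
--             continue
--         if best_rank is None or r < best_rank:
--             best_rank = r
--             best_val = h
--     return best_val
-- ===== Notes on version B (the rewrite author's own statement) =====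
-- stated objective: alternative
-- what changed: Replaces the two-phase scheme (membership+index scan per candidate key, then a fallback substring loop) by a single pass over the header that assigns each entry a priority rank and keeps the earliest entry of strictly smallest rank.
import Mathlib
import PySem

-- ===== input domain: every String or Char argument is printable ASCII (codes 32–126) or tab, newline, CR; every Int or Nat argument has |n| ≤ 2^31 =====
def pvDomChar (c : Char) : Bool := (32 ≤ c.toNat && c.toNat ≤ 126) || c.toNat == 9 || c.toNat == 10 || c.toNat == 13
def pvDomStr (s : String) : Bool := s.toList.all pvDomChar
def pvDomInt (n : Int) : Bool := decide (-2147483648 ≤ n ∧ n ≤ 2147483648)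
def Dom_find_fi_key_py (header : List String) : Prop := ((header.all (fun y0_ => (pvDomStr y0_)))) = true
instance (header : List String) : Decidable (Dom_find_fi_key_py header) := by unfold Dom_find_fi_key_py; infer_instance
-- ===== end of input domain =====

-- B replaces A's two-phase candidate-then-fallback header scans by a single ranked pass (alternative decomposition); return values proved equal.


-- ===== PORT A =====
-- h.strip().lower()
def pvNorm (h : String) : String := PySem.Str.lower (PySem.Str.strip h)

-- FI_CANDIDATE_KEYS
def pvKeys : List String := ["flammability", "flammability_index", "flammability idx", "fi"]

-- second loop: for i, h in enumerate(lower): if 'flammability' in h: return header[i]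
def pvSubLoop (header : List String) : List (Int × String) → Option String
  | [] => none
  | (i, h) :: t =>
    if PySem.Str.isIn "flammability" h then PySem.List.pyGet? header i
    else pvSubLoop header t

-- first loop: for key in FI_CANDIDATE_KEYS: if key in lower: return header[lower.index(key)]
-- (falls through to the second loop when the keys are exhausted)
def pvKeyLoop (header lower : List String) : List String → Option String
  | [] => pvSubLoop header (PySem.List.enumerate lower)
  | k :: ks =>
    if lower.contains k then
      match PySem.List.index? lower k with
      | some i => PySem.List.pyGet? header (i : Int)
      | none => none   -- unreachable: key is contained in lower
    else pvKeyLoop header lower ks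

def find_fi_key_py (header : List String) : Option String :=
  let lower := header.map pvNorm
  pvKeyLoop header lower pvKeys

-- ===== PORT B =====
-- priority rank of a normalised entry (None = not a candidate)
def pvRank (s : String) : Option Nat :=
  if s == "flammability" then some 0
  else if s == "flammability_index" then some 1
  else if s == "flammability idx" then some 2
  else if s == "fi" then some 3
  else if PySem.Str.isIn "flammability" s then some 4
  else none

-- loop body: keep the earliest entry of strictly smallest rank
def pvStep (best : Option (Nat × String)) (h : String) : Option (Nat × String) :=
  match pvRank (pvNorm h) with
  | none => best
  | some r =>
    match best with
    | none => some (r, h)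
    | some (br, bv) => if r < br then some (r, h) else some (br, bv)

def find_fi_key_py_alt (header : List String) : Option String :=
  (header.foldl pvStep none).map (·.2)

-- ===== PRECONDITION & SPEC =====
def Spec_find_fi_key_py (header : List String) (out : Option String) : Prop := out = find_fi_key_py_alt header
instance (header : List String) (out : Option String) : Decidable (Spec_find_fi_key_py header out) := by unfold Spec_find_fi_key_py; infer_instance

-- ===== CLAIM (what is proved, stated in full; the proofs are below) =====
def Claim_equal_find_fi_key_py : Prop := ∀ (header : List String), Dom_find_fi_key_py header → Spec_find_fi_key_py header (find_fi_key_py header)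

-- ===== LEMMAS AND PROOFS =====

-- rank-k predicate on an (un-normalised) header entry
def pvP (k : Nat) (h : String) : Bool := pvRank (pvNorm h) == some k

-- nested-priority characterisation both ports are reduced to
def pvChainR (l : List String) : Option (Nat × String) :=
  match l.find? (pvP 0) with
  | some v => some (0, v)
  | none =>
  match l.find? (pvP 1) with
  | some v => some (1, v)
  | none =>
  match l.find? (pvP 2) with
  | some v => some (2, v)
  | none =>
  match l.find? (pvP 3) with
  | some v => some (3, v)
  | none =>
  match l.find? (pvP 4) with
  | some v => some (4, v)
  | none => none

def pvMerge : Option (Nat × String) → Option (Nat × String) → Option (Nat × String)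
  | b, none => b
  | none, x => x
  | some (br, bv), some (r, v) => if r < br then some (r, v) else some (br, bv)

theorem pvMerge_none_left (x : Option (Nat × String)) : pvMerge none x = x := by
  cases x <;> rfl

theorem pvMerge_assoc (a b c : Option (Nat × String)) :
    pvMerge (pvMerge a b) c = pvMerge a (pvMerge b c) := by
  rcases a with _ | ⟨ar, av⟩ <;> rcases b with _ | ⟨br, bv⟩ <;> rcases c with _ | ⟨cr, cv⟩ <;>
    simp only [pvMerge] <;> split_ifs <;> simp only [pvMerge] <;> split_ifs <;>
    first | rfl | omega

theorem pvChainR_cons (h : String) (t : List String) :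
    pvChainR (h :: t) = pvMerge (pvStep none h) (pvChainR t) := by
  have hcons : ∀ k, (h :: t).find? (pvP k) = if pvP k h then some h else t.find? (pvP k) :=
    fun k => by cases hk : pvP k h <;> simp [hk]
  rcases hr : pvRank (pvNorm h) with _ | r
  · have hp : ∀ k, pvP k h = false := fun k => by simp [pvP, hr]
    have hs : pvStep none h = none := by simp [pvStep, hr]
    rw [hs, pvMerge_none_left]
    conv_lhs => unfold pvChainR
    conv_rhs => unfold pvChainR
    simp only [hcons, hp, Bool.false_eq_true, if_false]
  · have hs : pvStep none h = some (r, h) := by simp [pvStep, hr]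
    rw [hs]
    have hp : ∀ k, pvP k h = decide (k = r) := fun k => by
      by_cases hk : k = r <;> simp [pvP, hr, hk] <;> omega
    have hr5 : r = 0 ∨ r = 1 ∨ r = 2 ∨ r = 3 ∨ r = 4 := by
      unfold pvRank at hr; split_ifs at hr <;> simp_all
    conv_lhs => unfold pvChainR
    conv_rhs => unfold pvChainR
    rcases hr5 with rfl|rfl|rfl|rfl|rfl <;>
      simp only [hcons, hp, decide_eq_true_eq] <;>
      norm_num <;>
      rcases h0 : t.find? (pvP 0) with _ | v0 <;>
      rcases h1 : t.find? (pvP 1) with _ | v1 <;>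
      rcases h2 : t.find? (pvP 2) with _ | v2 <;>
      rcases h3 : t.find? (pvP 3) with _ | v3 <;>
      rcases h4 : t.find? (pvP 4) with _ | v4 <;>
      simp [pvMerge]

theorem pvStep_eq_merge (b : Option (Nat × String)) (h : String) :
    pvStep b h = pvMerge b (pvStep none h) := by
  unfold pvStep
  cases hr : pvRank (pvNorm h) with
  | none => cases b <;> rfl
  | some r => cases b with
    | none => rfl
    | some p => rfl

theorem pvFoldl_merge (l : List String) (b : Option (Nat × String)) :
    l.foldl pvStep b = pvMerge b (l.foldl pvStep none) := by
  induction l generalizing b with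
  | nil => cases b <;> rfl
  | cons h t ih =>
    simp only [List.foldl_cons]
    rw [ih (pvStep b h), ih (pvStep none h), pvStep_eq_merge b h, pvMerge_assoc]

theorem pvFoldl_eq_chainR (l : List String) : l.foldl pvStep none = pvChainR l := by
  induction l with
  | nil => rfl
  | cons h t ih =>
    rw [List.foldl_cons, pvFoldl_merge t (pvStep none h), ih, pvChainR_cons]

theorem pvIndex_map_get (key : String) (l : List String) :
    (match PySem.List.index? (l.map pvNorm) key with
     | some i => PySem.List.pyGet? l (i : Int)
     | none => none) = l.find? (fun h => pvNorm h == key) := by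
  induction l with
  | nil => simp [PySem.List.index?]
  | cons h t ih =>
    by_cases hk : pvNorm h = key
    · rw [List.map_cons, hk, PySem.List.index?_cons_self]
      simp [List.find?_cons, hk, PySem.List.pyGet?_zero_cons]
    · rw [List.map_cons, PySem.List.index?_cons_of_ne _ hk]
      rcases hi : PySem.List.index? (t.map pvNorm) key with _ | i <;> rw [hi] at ih
      · simp [List.find?_cons, hk, ← ih]
      · simp only [Option.map_some]
        have hcast : ((i + 1 : Nat) : Int) = (i : Int) + 1 := by push_cast; ring
        rw [hcast, PySem.List.pyGet?_cons_succ]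
        simp [List.find?_cons, hk, ← ih]

theorem pvContains_map (key : String) (l : List String) :
    (l.map pvNorm).contains key = (l.find? (fun h => pvNorm h == key)).isSome := by
  induction l with
  | nil => rfl
  | cons h t ih =>
    rw [List.map_cons, List.contains_cons, List.find?_cons]
    by_cases hk : pvNorm h = key
    · simp [hk]
    · have h1 : (key == pvNorm h) = false := by simp [Ne.symm hk]
      have h2 : (pvNorm h == key) = false := by simp [hk]
      rw [h1, h2, Bool.false_or, ih]

theorem pvKeyLoop_cons (l : List String) (k : String) (ks : List String) :
    pvKeyLoop l (l.map pvNorm) (k :: ks) =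
      (l.find? (fun h => pvNorm h == k)).or (pvKeyLoop l (l.map pvNorm) ks) := by
  conv_lhs => unfold pvKeyLoop
  rw [pvContains_map]
  rcases hf : l.find? (fun h => pvNorm h == k) with _ | v
  · rw [hf] at *
    simp
  · simp only [hf, Option.isSome_some, if_pos]
    rw [pvIndex_map_get, hf]
    rfl

theorem pvSubLoop_eq (suf pre : List String) :
    pvSubLoop (pre ++ suf) (PySem.List.enumerate (suf.map pvNorm) (pre.length : Int)) =
      suf.find? (fun h => PySem.Str.isIn "flammability" (pvNorm h)) := by
  induction suf generalizing pre with
  | nil => simp [PySem.List.enumerate, pvSubLoop]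
  | cons h t ih =>
    rw [List.map_cons, PySem.List.enumerate_cons]
    unfold pvSubLoop
    rcases hin : PySem.Str.isIn "flammability" (pvNorm h)
    · simp only [hin, Bool.false_eq_true, if_false, List.find?_cons]
      have h1 : pre ++ h :: t = (pre ++ [h]) ++ t := by simp
      have h2 : ((pre.length : Int) + 1) = (((pre ++ [h]).length : Nat) : Int) := by
        simp
      rw [h1, h2, ih (pre ++ [h])]
    · simp only [hin, if_pos, List.find?_cons]
      rw [PySem.List.pyGet?_append_length]

theorem pvP_eq (k : Nat) (key : String)
    (hk : ["flammability", "flammability_index", "flammability idx", "fi"][k]? = some key) :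
    pvP k = fun h => pvNorm h == key := by
  have hk4 : k < 4 := by
    by_contra hlt
    rw [List.getElem?_eq_none (by simpa using hlt)] at hk
    cases hk
  funext h
  interval_cases k <;> simp_all <;> subst hk <;>
    simp only [pvP] <;> unfold pvRank <;> split_ifs <;> simp_all

theorem pvFind?_congr {α : Type} (p q : α → Bool) (l : List α)
    (h : ∀ a ∈ l, p a = q a) : l.find? p = l.find? q := by
  induction l with
  | nil => rfl
  | cons a t ih =>
    rw [List.find?_cons, List.find?_cons, h a (by simp)]
    cases q a
    · exact ih fun x hx => h x (by simp [hx])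
    · rfl

theorem pvP4_point (a : String)
    (e0 : (pvNorm a == "flammability") = false)
    (e1 : (pvNorm a == "flammability_index") = false)
    (e2 : (pvNorm a == "flammability idx") = false)
    (e3 : (pvNorm a == "fi") = false) :
    pvP 4 a = PySem.Str.isIn "flammability" (pvNorm a) := by
  simp only [pvP]; unfold pvRank
  rw [e0, e1, e2, e3]
  rcases hin : PySem.Str.isIn "flammability" (pvNorm a) <;> simp [hin]

theorem pvFinal (header : List String) :
    find_fi_key_py header = find_fi_key_py_alt header := by
  unfold find_fi_key_py find_fi_key_py_alt
  rw [pvFoldl_eq_chainR]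
  show pvKeyLoop header (header.map pvNorm) pvKeys = _
  rw [show pvKeys = ["flammability", "flammability_index", "flammability idx", "fi"] from rfl]
  rw [pvKeyLoop_cons, pvKeyLoop_cons, pvKeyLoop_cons, pvKeyLoop_cons]
  have hbase : pvKeyLoop header (header.map pvNorm) [] =
      header.find? (fun h => PySem.Str.isIn "flammability" (pvNorm h)) := by
    unfold pvKeyLoop
    have h2 := pvSubLoop_eq header []
    simpa using h2
  rw [hbase]
  rw [← pvP_eq 0 _ rfl, ← pvP_eq 1 _ rfl, ← pvP_eq 2 _ rfl, ← pvP_eq 3 _ rfl]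
  unfold pvChainR
  rcases h0 : header.find? (pvP 0) with _ | v0 <;> simp only [h0, Option.or_some, Option.map_some]
  · rcases h1 : header.find? (pvP 1) with _ | v1 <;> simp only [h1, Option.or_some, Option.map_some]
    · rcases h2 : header.find? (pvP 2) with _ | v2 <;> simp only [h2, Option.or_some, Option.map_some]
      · rcases h3 : header.find? (pvP 3) with _ | v3 <;> simp only [h3, Option.or_some, Option.map_some]
        · have h4 : header.find? (pvP 4) =
              header.find? (fun h => PySem.Str.isIn "flammability" (pvNorm h)) := by
            apply pvFind?_congr
            intro a ha
            have e0 := List.find?_eq_none.mp h0 a ha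
            have e1 := List.find?_eq_none.mp h1 a ha
            have e2 := List.find?_eq_none.mp h2 a ha
            have e3 := List.find?_eq_none.mp h3 a ha
            rw [pvP_eq 0 _ rfl] at e0; rw [pvP_eq 1 _ rfl] at e1
            rw [pvP_eq 2 _ rfl] at e2; rw [pvP_eq 3 _ rfl] at e3
            exact pvP4_point a (by simpa using e0) (by simpa using e1)
              (by simpa using e2) (by simpa using e3)
          rw [h4]
          rcases hs : header.find? (fun h => PySem.Str.isIn "flammability" (pvNorm h)) <;> simp
        · simp
      · simp
    · simp
  · simp

-- ===== VERDICT (by name: the statement is the Claim_ definition above) =====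
theorem find_fi_key_py_spec : Claim_equal_find_fi_key_py := by
  intro header _
  show find_fi_key_py header = find_fi_key_py_alt header
  exact pvFinal header
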